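-- pv_equiv track=rewrite | github.com/lhsn37/riderwelfare | main.py | next_grade_target
-- ===== SOURCE A (Python) =====
-- from typing import Any, Dict, List, Optional, Tuple
--
-- def grade_from_total(total: int) -> str:
--     if total <= 479:
--         return "무등급"
--     if total <= 719:
--         return "R5"
--     if total <= 959:
--         return "R4"
--     if total <= 1199:
--         return "R3"
--     if total <= 1439:
--         return "R2"
--     return "R1"
--
-- def next_grade_target(total: int) -> Tuple[Optional[str], Optional[int]]:
--     thresholds = [
--         ("무등급", 0),
--         ("R5", 480),
--         ("R4", 720),
--         ("R3", 960),
--         ("R2", 1200),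
--         ("R1", 1440),
--     ]
--     cur = grade_from_total(total)
--     idx = [g for g, _ in thresholds].index(cur)
--     if cur == "R1":
--         return None, None
--     nxt_g, nxt_t = thresholds[idx + 1]
--     return nxt_g, max(0, nxt_t - total)
-- ===== SOURCE B (Python) =====
-- from typing import Optional, Tuple
--
-- def next_grade_target(total: int) -> Tuple[Optional[str], Optional[int]]:
--     for grade, threshold in (("R5", 480), ("R4", 720), ("R3", 960), ("R2", 1200), ("R1", 1440)):
--         if total < threshold:
--             return grade, threshold - total
--     return None, None
-- ===== Notes on version B (the rewrite author's own statement) =====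
-- stated objective: simpler
-- what changed: B replaces A's classify-then-index pipeline (compute current grade string, .index it in a list scan, look up idx+1, max with 0) with one direct scan over the upward boundaries, returning the first boundary exceeding total; it never builds the current-grade string or uses .index.
import Mathlib
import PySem

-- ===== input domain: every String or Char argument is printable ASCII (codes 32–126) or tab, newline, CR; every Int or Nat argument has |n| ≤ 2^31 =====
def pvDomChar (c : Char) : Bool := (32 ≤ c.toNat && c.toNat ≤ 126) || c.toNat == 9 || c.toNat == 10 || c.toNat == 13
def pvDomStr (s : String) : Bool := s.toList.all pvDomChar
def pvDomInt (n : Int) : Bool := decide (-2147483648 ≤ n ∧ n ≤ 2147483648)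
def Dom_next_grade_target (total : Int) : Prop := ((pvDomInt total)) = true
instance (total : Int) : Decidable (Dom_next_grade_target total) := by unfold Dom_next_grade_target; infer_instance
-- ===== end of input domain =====

-- B replaces A's classify-then-index approach with a single direct scan over the upward grade boundaries (simpler decomposition).


-- ===== PORT A =====
def grade_from_total (total : Int) : String :=
  if total ≤ 479 then "무등급"
  else if total ≤ 719 then "R5"
  else if total ≤ 959 then "R4"
  else if total ≤ 1199 then "R3"
  else if total ≤ 1439 then "R2"
  else "R1"

-- `.index` always finds `cur` here; ported with index? (none is unreachable → (none, none) placeholder, as is the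
-- out-of-range pyGet? case, both never taken)
def next_grade_target (total : Int) : Option String × Option Int :=
  let thresholds : List (String × Int) :=
    [("무등급", 0), ("R5", 480), ("R4", 720), ("R3", 960), ("R2", 1200), ("R1", 1440)]
  let cur := grade_from_total total
  match PySem.List.index? (thresholds.map Prod.fst) cur with
  | none => (none, none)
  | some idx =>
    if cur == "R1" then (none, none)
    else
      match PySem.List.pyGet? thresholds ((idx : Int) + 1) with
      | none => (none, none)
      | some (nxt_g, nxt_t) => (some nxt_g, some (max 0 (nxt_t - total)))

-- ===== PORT B =====
def ngtScan (total : Int) : List (String × Int) → Option String × Option Int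
  | [] => (none, none)
  | (grade, threshold) :: rest =>
      if total < threshold then (some grade, some (threshold - total))
      else ngtScan total rest

def next_grade_target_alt (total : Int) : Option String × Option Int :=
  ngtScan total [("R5", 480), ("R4", 720), ("R3", 960), ("R2", 1200), ("R1", 1440)]

-- ===== PRECONDITION & SPEC =====
def Spec_next_grade_target (total : Int) (out : Option String × Option Int) : Prop := out = next_grade_target_alt total
instance (total : Int) (out : Option String × Option Int) : Decidable (Spec_next_grade_target total out) := by unfold Spec_next_grade_target; infer_instance

-- ===== CLAIM (what is proved, stated in full; the proofs are below) =====
def Claim_equal_next_grade_target : Prop := ∀ (total : Int), Dom_next_grade_target total → Spec_next_grade_target total (next_grade_target total)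

-- ===== LEMMAS AND PROOFS =====

-- ===== VERDICT (by name: the statement is the Claim_ definition above) =====
theorem pv_idx0 : List.idxOf? "무등급" ["무등급", "R5", "R4", "R3", "R2", "R1"] = some 0 := by decide
theorem pv_idx1 : List.idxOf? "R5" ["무등급", "R5", "R4", "R3", "R2", "R1"] = some 1 := by decide
theorem pv_idx2 : List.idxOf? "R4" ["무등급", "R5", "R4", "R3", "R2", "R1"] = some 2 := by decide
theorem pv_idx3 : List.idxOf? "R3" ["무등급", "R5", "R4", "R3", "R2", "R1"] = some 3 := by decide
theorem pv_idx4 : List.idxOf? "R2" ["무등급", "R5", "R4", "R3", "R2", "R1"] = some 4 := by decide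

theorem next_grade_target_spec : Claim_equal_next_grade_target := by
  intro total _
  unfold Spec_next_grade_target next_grade_target next_grade_target_alt grade_from_total
  have hm : ∀ d : Int, 0 ≤ d → max 0 d = d := fun d hd => max_eq_right hd
  by_cases h1 : total ≤ 479
  · simp [h1, ngtScan, PySem.List.index?, PySem.List.pyGet?, PySem.List.pyIdx?, pv_idx0,
      hm _ (show (0:Int) ≤ 480 - total by omega), show total < 480 by omega]
  · by_cases h2 : total ≤ 719
    · simp [h1, h2, ngtScan, PySem.List.index?, PySem.List.pyGet?, PySem.List.pyIdx?, pv_idx1,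
        hm _ (show (0:Int) ≤ 720 - total by omega),
        show ¬ total < 480 by omega, show total < 720 by omega]
    · by_cases h3 : total ≤ 959
      · simp [h1, h2, h3, ngtScan, PySem.List.index?, PySem.List.pyGet?, PySem.List.pyIdx?, pv_idx2,
          hm _ (show (0:Int) ≤ 960 - total by omega),
          show ¬ total < 480 by omega, show ¬ total < 720 by omega, show total < 960 by omega]
      · by_cases h4 : total ≤ 1199
        · simp [h1, h2, h3, h4, ngtScan, PySem.List.index?, PySem.List.pyGet?, PySem.List.pyIdx?, pv_idx3,
            hm _ (show (0:Int) ≤ 1200 - total by omega),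
            show ¬ total < 480 by omega, show ¬ total < 720 by omega, show ¬ total < 960 by omega,
            show total < 1200 by omega]
        · by_cases h5 : total ≤ 1439
          · simp [h1, h2, h3, h4, h5, ngtScan, PySem.List.index?, PySem.List.pyGet?, PySem.List.pyIdx?, pv_idx4,
              hm _ (show (0:Int) ≤ 1440 - total by omega),
              show ¬ total < 480 by omega, show ¬ total < 720 by omega, show ¬ total < 960 by omega,
              show ¬ total < 1200 by omega, show total < 1440 by omega]
          · simp only [h1, h2, h3, h4, h5, if_false, ngtScan,
              show ¬ total < 480 by omega, show ¬ total < 720 by omega, show ¬ total < 960 by omega,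
              show ¬ total < 1200 by omega, show ¬ total < 1440 by omega, PySem.List.index?]
            cases List.idxOf? "R1" ["무등급", "R5", "R4", "R3", "R2", "R1"] <;> rfl
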